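-- pv_equiv track=rewrite | github.com/wattanunteeratanapong/01076109-OBJECT-ORIENTED-DATA-STRUCTURES | Lab8/Chapter10 (Search)/10.2.py | first_greater_value
-- ===== SOURCE A (Python) =====
-- def first_greater_value(arr, targets):
--     arr.sort()
--
--     def binary_search(arr, target):
--         l, r = 0, len(arr) - 1
--         result = -1
--         while l <= r:
--             mid = (l + r) // 2
--             if arr[mid] > target:
--                 result = arr[mid]
--                 r = mid - 1
--             else:
--                 l = mid + 1
--         return result
--
--     result = []
--     for target in targets:
--         greater_value = binary_search(arr, target)
--         if greater_value != -1:
--             result.append(str(greater_value))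
--         else:
--             result.append("No First Greater Value")
--
--     return '\n'.join(result)
-- ===== SOURCE B (Python) =====
-- def first_greater_value(arr, targets):
--     arr.sort()
--     m = len(targets)
--     order = sorted(range(m), key=lambda k: targets[k])
--     found = [-1] * m
--     i = 0
--     for idx in order:
--         t = targets[idx]
--         while i < len(arr) and arr[i] <= t:
--             i += 1
--         if i < len(arr):
--             found[idx] = arr[i]
--     return '\n'.join(str(v) if v != -1 else "No First Greater Value" for v in found)
-- ===== Notes on version B (the rewrite author's own statement) =====
-- stated objective: faster
-- what changed: Replaces the per-target binary search with an offline two-pointer sweep: targets are visited in sorted order while a single pointer advances at most once over the whole sorted array, answers written back by original index (keeping A's -1-means-absent convention); same asymptotics but far less per-query interpreter work (measured ~1.6-1.9x).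
import Mathlib
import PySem

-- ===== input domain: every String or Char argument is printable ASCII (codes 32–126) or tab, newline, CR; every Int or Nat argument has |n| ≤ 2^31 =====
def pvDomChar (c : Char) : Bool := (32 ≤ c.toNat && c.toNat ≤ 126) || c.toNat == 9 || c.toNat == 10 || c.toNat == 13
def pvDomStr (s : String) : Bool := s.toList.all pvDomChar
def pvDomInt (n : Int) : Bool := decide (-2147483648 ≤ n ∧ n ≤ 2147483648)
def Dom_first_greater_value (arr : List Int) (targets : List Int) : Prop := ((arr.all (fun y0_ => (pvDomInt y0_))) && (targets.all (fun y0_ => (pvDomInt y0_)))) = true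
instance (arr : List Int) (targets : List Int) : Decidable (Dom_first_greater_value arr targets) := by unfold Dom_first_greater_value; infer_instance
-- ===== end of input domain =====

-- B replaces A's per-target binary search by an offline two-pointer sweep (targets visited in
-- sorted order, one pointer advancing once over the sorted array), keeping A's -1-means-absent
-- convention. Python A and B both sort arr in place; the equivalence proved is about the return value.

-- ===== PORT A =====
-- the while-loop of A's inner binary_search; terminates because r - l shrinks
def pvBsLoop (arr : List Int) (target : Int) (l r result : Int) : Int :=
  if h : l ≤ r then
    let mid := PySem.Int.floordiv (l + r) 2
    match PySem.List.pyGet? arr mid with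
    | some v =>
      if v > target then pvBsLoop arr target l (mid - 1) v
      else pvBsLoop arr target (mid + 1) r result
    | none => result   -- Python would raise here; unreachable from binary_search's initial state
  else result
termination_by (r - l + 1).toNat
decreasing_by
  all_goals
    have hb := PySem.Int.floordiv_two_mid_bounds (lo := l) (hi := r) h
    omega

def first_greater_value (arr : List Int) (targets : List Int) : String :=
  let sortedArr := PySem.List.sorted arr (fun x => x)
  let result := targets.foldl (fun acc target =>
    let greater_value := pvBsLoop sortedArr target 0 ((sortedArr.length : Int) - 1) (-1)
    if greater_value ≠ -1 then acc ++ [PySem.Int.toStr greater_value]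
    else acc ++ ["No First Greater Value"]) []
  PySem.Str.join "\n" result

-- ===== PORT B =====
-- the while-loop 'while i < len(arr) and arr[i] <= t: i += 1' of Source B
def pvAdvance (s : List Int) (t : Int) (i : Int) : Int :=
  if h : i < (s.length : Int) ∧ PySem.List.pyGetD s i 0 ≤ t then pvAdvance s t (i + 1)
  else i
termination_by ((s.length : Int) - i).toNat
decreasing_by omega

def first_greater_value_alt (arr : List Int) (targets : List Int) : String :=
  let sortedArr := PySem.List.sorted arr (fun x => x)
  let m := targets.length
  let order := PySem.List.sorted (PySem.List.pyRange 0 (m : Int)) (fun k => PySem.List.pyGetD targets k 0)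
  let st := order.foldl (fun (st : Int × List Int) idx =>
      let t := PySem.List.pyGetD targets idx 0
      let i := pvAdvance sortedArr t st.1
      (i, if i < (sortedArr.length : Int)
          then PySem.List.pySetD st.2 idx (PySem.List.pyGetD sortedArr i 0)
          else st.2))
    ((0 : Int), List.replicate m (-1 : Int))
  PySem.Str.join "\n" (st.2.map (fun v =>
    if v ≠ -1 then PySem.Int.toStr v else "No First Greater Value"))

-- ===== PRECONDITION & SPEC =====
def Spec_first_greater_value (arr : List Int) (targets : List Int) (out : String) : Prop :=
  out = first_greater_value_alt arr targets
instance (arr : List Int) (targets : List Int) (out : String) : Decidable (Spec_first_greater_value arr targets out) := by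
  unfold Spec_first_greater_value; infer_instance

-- ===== CLAIM (what is proved, stated in full; the proofs are below) =====
def Claim_equal_first_greater_value : Prop := ∀ (arr : List Int) (targets : List Int), Dom_first_greater_value arr targets → Spec_first_greater_value arr targets (first_greater_value arr targets)

-- ===== LEMMAS AND PROOFS =====

-- the first array value greater than t on the sorted array, with A's -1-means-absent convention
def pvG (s : List Int) (t : Int) : Int :=
  match s.find? (fun x => decide (t < x)) with | some x => x | none => -1

-- the per-target answer line both programs print
def pvLineA (s : List Int) (t : Int) : String :=
  if pvG s t ≠ -1 then PySem.Int.toStr (pvG s t) else "No First Greater Value"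

-- the write Source B's loop body performs at index idx, as a function of the input only
def pvWrite (s targets : List Int) (a : List Int) (idx : Int) : List Int :=
  if s.findIdx (fun x => decide (PySem.List.pyGetD targets idx 0 < x)) < s.length
  then PySem.List.pySetD a idx
    (PySem.List.pyGetD s ((s.findIdx (fun x => decide (PySem.List.pyGetD targets idx 0 < x)) : Nat) : Int) 0)
  else a

theorem pv_pairwise_getElem_le {s : List Int} (hs : s.Pairwise (· ≤ ·)) {i j : Nat}
    (hij : i ≤ j) (hj : j < s.length) : s[i]'(by omega) ≤ s[j] := by
  rcases Nat.lt_or_ge i j with h | h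
  · exact (List.pairwise_iff_getElem.mp hs) i j (by omega) hj h
  · have : i = j := by omega
    subst this; exact le_refl _

theorem pv_find?_eq_some_of_first (s : List Int) (p : Int → Bool) (j : Nat)
    (hj : j < s.length) (hp : p (s[j]) = true)
    (hmin : ∀ i (hi : i < j), p (s[i]'(by omega)) = false) :
    s.find? p = some (s[j]) := by
  induction s generalizing j with
  | nil => simp at hj
  | cons a t ih =>
    cases j with
    | zero =>
      rw [List.find?_cons_of_pos (by simpa using hp)]
      simp
    | succ j =>
      have ha : p a = false := by simpa using hmin 0 (by omega)
      rw [List.find?_cons_of_neg (by simp [ha])]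
      exact ih j (by simpa using hj) (by simpa using hp)
        (fun i hi => by simpa using hmin (i+1) (by omega))

-- find? via findIdx
theorem pv_find?_findIdx (s : List Int) (p : Int → Bool) :
    s.find? p = if h : s.findIdx p < s.length then some (s[s.findIdx p]'h) else none := by
  by_cases h : s.findIdx p < s.length
  · rw [dif_pos h]
    exact pv_find?_eq_some_of_first s p (s.findIdx p) h List.findIdx_getElem
      (fun i hi => List.not_of_lt_findIdx hi)
  · rw [dif_neg h, List.find?_eq_none]
    intro x hx hpx
    exact h (List.findIdx_lt_length.mpr ⟨x, hx, hpx⟩)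

theorem pvG_of_lt {s : List Int} {t : Int}
    (h : s.findIdx (fun x => decide (t < x)) < s.length) :
    pvG s t = PySem.List.pyGetD s ((s.findIdx (fun x => decide (t < x)) : Nat) : Int) 0 := by
  rw [pvG, pv_find?_findIdx, dif_pos h, PySem.List.pyGetD_natCast, List.getD_eq_getElem s 0 h]

theorem pvG_of_ge {s : List Int} {t : Int}
    (h : ¬ s.findIdx (fun x => decide (t < x)) < s.length) :
    pvG s t = -1 := by
  rw [pvG, pv_find?_findIdx, dif_neg h]


theorem pvBsLoop_terminal (s : List Int) (t l r result : Int) (hlr : ¬ l ≤ r) (hrm : -1 ≤ r)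
    (hlo : ∀ i : Nat, ∀ hi : i < s.length, (i : Int) < l → s[i] ≤ t)
    (hhi : ∀ i : Nat, ∀ hi : i < s.length, r < (i : Int) → t < s[i])
    (hres : result = (if hh : (r + 1).toNat < s.length then s[(r + 1).toNat] else -1)) :
    result = pvG s t := by
  rw [pvG]
  by_cases hh : (r + 1).toNat < s.length
  · have hp : decide (t < s[(r + 1).toNat]) = true := by
      simpa using hhi (r + 1).toNat hh (by omega)
    have hfind : s.find? (fun x => decide (t < x)) = some (s[(r + 1).toNat]) := by
      refine pv_find?_eq_some_of_first s _ (r + 1).toNat hh hp ?_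
      intro i hi
      have hle : s[i]'(by omega) ≤ t := hlo i (by omega) (by omega)
      simpa using hle
    rw [hfind]
    simpa [hh] using hres
  · have hfind : s.find? (fun x => decide (t < x)) = none := by
      rw [List.find?_eq_none]
      intro x hx
      rcases List.mem_iff_getElem.mp hx with ⟨i, hi, rfl⟩
      have hle : s[i] ≤ t := hlo i hi (by omega)
      simpa using hle
    rw [hfind]
    simpa [hh] using hres

-- On a sorted list, A's binary-search loop computes the first element > t (else -1).
theorem pvBsLoop_spec (s : List Int) (hs : s.Pairwise (· ≤ ·)) (t : Int) :
    ∀ k (l r result : Int), (r - l + 1).toNat ≤ k → 0 ≤ l → r ≤ (s.length : Int) - 1 → -1 ≤ r →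
    (∀ i : Nat, ∀ hi : i < s.length, (i : Int) < l → s[i] ≤ t) →
    (∀ i : Nat, ∀ hi : i < s.length, r < (i : Int) → t < s[i]) →
    result = (if hh : (r + 1).toNat < s.length then s[(r + 1).toNat] else -1) →
    pvBsLoop s t l r result = pvG s t := by
  intro k
  induction k with
  | zero =>
    intro l r result hk hl hr hrm hlo hhi hres
    have hlr : ¬ l ≤ r := by omega
    rw [pvBsLoop]; simp only [hlr, dite_false]
    exact pvBsLoop_terminal s t l r result hlr hrm hlo hhi hres
  | succ k ih =>
    intro l r result hk hl hr hrm hlo hhi hres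
    rw [pvBsLoop]
    by_cases hlr : l ≤ r
    · simp only [hlr, dite_true]
      have hb := PySem.Int.floordiv_two_mid_bounds (lo := l) (hi := r) hlr
      set mid := PySem.Int.floordiv (l + r) 2 with hmid
      have hm0 : 0 ≤ mid := by omega
      have hmlen : mid < (s.length : Int) := by omega
      have hmn : mid.toNat < s.length := by omega
      have hget : PySem.List.pyGet? s mid = some (s[mid.toNat]) :=
        PySem.List.pyGet?_eq_some_getElem (xs := s) (i := mid) hm0 hmlen
      rw [hget]
      by_cases hv : s[mid.toNat] > t
      · simp only [hv, if_true]
        refine ih l (mid - 1) (s[mid.toNat]) (by omega) hl (by omega) (by omega) hlo ?_ ?_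
        · intro i hi him
          have hle : mid.toNat ≤ i := by omega
          exact lt_of_lt_of_le hv (pv_pairwise_getElem_le hs hle hi)
        · have he : (mid - 1 + 1).toNat = mid.toNat := by omega
          rw [he]; simp [hmn]
      · simp only [hv, if_false]
        refine ih (mid + 1) r result (by omega) (by omega) hr hrm ?_ hhi hres
        intro i hi him
        have h1 : i ≤ mid.toNat := by omega
        exact le_trans (pv_pairwise_getElem_le hs h1 hmn) (by omega)
    · simp only [hlr, dite_false]
      exact pvBsLoop_terminal s t l r result hlr hrm hlo hhi hres

-- evaluate A's loop from binary_search's initial state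
theorem pvBsLoop_run (s : List Int) (hs : s.Pairwise (· ≤ ·)) (t : Int) :
    pvBsLoop s t 0 ((s.length : Int) - 1) (-1) = pvG s t := by
  refine pvBsLoop_spec s hs t s.length 0 ((s.length : Int) - 1) (-1) (by omega) (by omega)
    (by omega) (by omega) ?_ ?_ ?_
  · intro i hi him; omega
  · intro i hi him; omega
  · rw [dif_neg]; omega

-- A's append loop as a map
theorem pv_foldA (s : List Int) (ts : List Int) (acc : List String) :
    ts.foldl (fun acc target =>
      let greater_value := pvBsLoop s target 0 ((s.length : Int) - 1) (-1)
      if greater_value ≠ -1 then acc ++ [PySem.Int.toStr greater_value]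
      else acc ++ ["No First Greater Value"]) acc
    = acc ++ ts.map (fun target =>
      let greater_value := pvBsLoop s target 0 ((s.length : Int) - 1) (-1)
      if greater_value ≠ -1 then PySem.Int.toStr greater_value
      else "No First Greater Value") := by
  induction ts generalizing acc with
  | nil => simp
  | cons a ts ih =>
    simp only [List.foldl_cons, List.map_cons, ih]
    split_ifs <;> simp

-- A as a join of per-target lines
theorem pv_A_eq (arr targets : List Int) :
    first_greater_value arr targets =
      PySem.Str.join "\n" (targets.map (fun t => pvLineA (PySem.List.sorted arr (fun x => x)) t)) := by
  have hsp : (PySem.List.sorted arr (fun x => x)).Pairwise (· ≤ ·) := by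
    simpa using PySem.List.sorted_pairwise (xs := arr) (key := fun x => x)
  unfold first_greater_value
  simp only [pv_foldA, List.nil_append]
  congr 1
  apply List.map_congr_left
  intro t _
  rw [pvLineA, pvBsLoop_run _ hsp]

-- B's inner while loop computes List.findIdx of 'greater than t' on the sorted array
theorem pvAdvance_spec (s : List Int) (hs : s.Pairwise (· ≤ ·)) (t : Int) :
    ∀ k (i : Int), ((s.length : Int) - i).toNat ≤ k → 0 ≤ i → i ≤ (s.length : Int) →
    (∀ j : Nat, ∀ hj : j < s.length, (j : Int) < i → s[j] ≤ t) →
    pvAdvance s t i = ((s.findIdx (fun x => decide (t < x)) : Nat) : Int) := by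
  intro k
  induction k with
  | zero =>
    intro i hk h0 hn hpre
    rw [pvAdvance, dif_neg (by omega)]
    have hnl : ¬ s.findIdx (fun x => decide (t < x)) < s.length := by
      rw [List.findIdx_lt_length]
      rintro ⟨x, hx, hpx⟩
      rcases List.mem_iff_getElem.mp hx with ⟨j, hj, rfl⟩
      have := hpre j hj (by omega)
      simp at hpx; omega
    have := List.findIdx_le_length (p := fun x => decide (t < x)) (xs := s)
    omega
  | succ k ih =>
    intro i hk h0 hn hpre
    rw [pvAdvance]
    by_cases h : i < (s.length : Int) ∧ PySem.List.pyGetD s i 0 ≤ t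
    · rw [dif_pos h]
      refine ih (i + 1) (by omega) (by omega) (by omega) ?_
      intro j hj hji
      by_cases hji' : (j : Int) < i
      · exact hpre j hj hji'
      · have hjeq : i = ((j : Nat) : Int) := by omega
        rw [hjeq] at h
        have hg : PySem.List.pyGetD s ((j : Nat) : Int) 0 = s[j] := by
          rw [PySem.List.pyGetD_natCast]
          exact List.getD_eq_getElem s 0 hj
        rw [hg] at h
        exact h.2
    · rw [dif_neg h]
      by_cases hin : i < (s.length : Int)
      · have hit : ¬ PySem.List.pyGetD s i 0 ≤ t := fun hc => h ⟨hin, hc⟩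
        have hitn : i.toNat < s.length := by omega
        have hge : PySem.List.pyGetD s i 0 = s[i.toNat] :=
          PySem.List.pyGetD_eq_getElem s 0 h0 hin
        have hvt : t < s[i.toNat] := by omega
        have hle : s.findIdx (fun x => decide (t < x)) ≤ i.toNat := by
          by_contra hcon
          have h2 := List.not_of_lt_findIdx (p := fun x => decide (t < x)) (xs := s)
            (i := i.toNat) (by omega)
          simp at h2; omega
        have hge2 : i.toNat ≤ s.findIdx (fun x => decide (t < x)) := by
          by_contra hcon
          have hfl : s.findIdx (fun x => decide (t < x)) < s.length := by omega
          have hptrue := List.findIdx_getElem (w := hfl)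
          have := hpre (s.findIdx (fun x => decide (t < x))) hfl (by omega)
          simp at hptrue; omega
        omega
      · have hnl : ¬ s.findIdx (fun x => decide (t < x)) < s.length := by
          rw [List.findIdx_lt_length]
          rintro ⟨x, hx, hpx⟩
          rcases List.mem_iff_getElem.mp hx with ⟨j, hj, rfl⟩
          have := hpre j hj (by omega)
          simp at hpx; omega
        have := List.findIdx_le_length (p := fun x => decide (t < x)) (xs := s)
        omega

-- the sweep performs exactly the conditional write pvWrite at each processed index
theorem pv_sweep (s : List Int) (hs : s.Pairwise (· ≤ ·)) (targets : List Int) :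
    ∀ (rest : List Int) (i0 : Int) (ans : List Int),
    rest.Pairwise (fun a b => PySem.List.pyGetD targets a 0 ≤ PySem.List.pyGetD targets b 0) →
    0 ≤ i0 → i0 ≤ (s.length : Int) →
    (∀ idx ∈ rest, ∀ j : Nat, ∀ hj : j < s.length, (j : Int) < i0 →
      s[j] ≤ PySem.List.pyGetD targets idx 0) →
    (rest.foldl (fun (st : Int × List Int) idx =>
      let t := PySem.List.pyGetD targets idx 0
      let i := pvAdvance s t st.1
      (i, if i < (s.length : Int)
          then PySem.List.pySetD st.2 idx (PySem.List.pyGetD s i 0)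
          else st.2)) (i0, ans)).2
    = rest.foldl (pvWrite s targets) ans := by
  intro rest
  induction rest with
  | nil => intro i0 ans _ _ _ _; rfl
  | cons idx rest ih =>
    intro i0 ans hpw h0 hn hpre
    rcases List.pairwise_cons.mp hpw with ⟨hhd, htl⟩
    simp only [List.foldl_cons]
    set t := PySem.List.pyGetD targets idx 0 with ht
    set F := s.findIdx (fun x => decide (t < x)) with hF
    have hFle : F ≤ s.length := List.findIdx_le_length
    have hadv : pvAdvance s t i0 = ((F : Nat) : Int) :=
      pvAdvance_spec s hs t (((s.length : Int) - i0).toNat) i0 (le_refl _) h0 hn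
        (fun j hj hji => hpre idx (List.mem_cons_self) j hj hji)
    have hw : (if pvAdvance s t i0 < (s.length : Int)
        then PySem.List.pySetD ans idx (PySem.List.pyGetD s (pvAdvance s t i0) 0)
        else ans) = pvWrite s targets ans idx := by
      rw [hadv, pvWrite]
      by_cases hFl : F < s.length
      · rw [if_pos (by exact_mod_cast hFl), if_pos hFl]
      · rw [if_neg (by omega), if_neg hFl]
    have hstep : ∀ j : Nat, ∀ hj : j < s.length, (j : Int) < ((F : Nat) : Int) → s[j] ≤ t := by
      intro j hj hjF
      have := List.not_of_lt_findIdx (p := fun x => decide (t < x)) (xs := s)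
        (i := j) (by omega)
      simp at this; omega
    rw [hw, hadv]
    refine ih ((F : Nat) : Int) (pvWrite s targets ans idx) htl (by omega)
      (by exact_mod_cast hFle) ?_
    intro idx' hidx' j hj hjF
    exact le_trans (hstep j hj hjF) (hhd idx' hidx')

theorem pv_write_len (s targets : List Int) (a : List Int) (idx : Int) :
    (pvWrite s targets a idx).length = a.length := by
  rw [pvWrite]
  split_ifs with h
  · rw [PySem.List.length_pySetD]
  · rfl

theorem pv_writefold_len (s targets : List Int) :
    ∀ (ord : List Int) (ans : List Int),
    (ord.foldl (pvWrite s targets) ans).length = ans.length := by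
  intro ord
  induction ord with
  | nil => intro ans; rfl
  | cons idx ord ih =>
    intro ans
    simp only [List.foldl_cons]
    rw [ih, pv_write_len]

-- reading one conditional write
theorem pv_write_get (s targets ans : List Int) (idx : Int) (j : Nat)
    (hj : j < ans.length) (h0 : 0 ≤ idx) (hm : idx < (ans.length : Int)) :
    PySem.List.pyGetD (pvWrite s targets ans idx) (j : Int) (-1)
      = if ((j : Int) = idx ∧
            s.findIdx (fun x => decide (PySem.List.pyGetD targets idx 0 < x)) < s.length)
        then pvG s (PySem.List.pyGetD targets idx 0)
        else PySem.List.pyGetD ans (j : Int) (-1) := by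
  rw [pvWrite]
  by_cases hFl : s.findIdx (fun x => decide (PySem.List.pyGetD targets idx 0 < x)) < s.length
  · rw [if_pos hFl]
    have hcast : idx = ((idx.toNat : Nat) : Int) := by omega
    rw [show PySem.List.pySetD ans idx
        (PySem.List.pyGetD s ((s.findIdx (fun x => decide (PySem.List.pyGetD targets idx 0 < x)) : Nat) : Int) 0)
      = PySem.List.pySetD ans ((idx.toNat : Nat) : Int)
        (PySem.List.pyGetD s ((s.findIdx (fun x => decide (PySem.List.pyGetD targets idx 0 < x)) : Nat) : Int) 0)
      from by rw [← hcast]]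
    rw [PySem.List.pyGetD_pySetD_natCast ans idx.toNat j _ _ (by omega)]
    by_cases hje : j = idx.toNat
    · rw [if_pos hje, if_pos ⟨by omega, hFl⟩, pvG_of_lt hFl]
    · rw [if_neg hje, if_neg (by rintro ⟨hc, _⟩; exact hje (by omega))]
  · rw [if_neg hFl, if_neg (by rintro ⟨_, hc⟩; exact hFl hc)]

-- folding the conditional writes: at each index of the range the slot holds pvG (or the initial value)
theorem pv_writefold_get (s targets : List Int) :
    ∀ (ord : List Int) (ans : List Int) (j : Nat),
    ans.length = targets.length → j < targets.length →
    (∀ idx ∈ ord, 0 ≤ idx ∧ idx < (targets.length : Int)) →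
    PySem.List.pyGetD (ord.foldl (pvWrite s targets) ans) (j : Int) (-1)
      = if ((j : Int) ∈ ord ∧
            s.findIdx (fun x => decide (PySem.List.pyGetD targets (j : Int) 0 < x)) < s.length)
        then pvG s (PySem.List.pyGetD targets (j : Int) 0)
        else PySem.List.pyGetD ans (j : Int) (-1) := by
  intro ord
  induction ord with
  | nil =>
    intro ans j _ _ _
    simp
  | cons idx ord ih =>
    intro ans j hlen hj hbd
    rcases hbd idx List.mem_cons_self with ⟨hidx0, hidxm⟩
    simp only [List.foldl_cons]
    rw [ih (pvWrite s targets ans idx) j (by rw [pv_write_len]; exact hlen) hj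
      (fun i hi => hbd i (List.mem_cons_of_mem _ hi))]
    by_cases h1 : ((j : Int) ∈ ord ∧
        s.findIdx (fun x => decide (PySem.List.pyGetD targets (j : Int) 0 < x)) < s.length)
    · rw [if_pos h1, if_pos ⟨List.mem_cons_of_mem _ h1.1, h1.2⟩]
    · rw [if_neg h1,
        pv_write_get s targets ans idx j (by omega) hidx0 (by omega)]
      by_cases h2 : ((j : Int) = idx ∧
          s.findIdx (fun x => decide (PySem.List.pyGetD targets idx 0 < x)) < s.length)
      · have hteq : PySem.List.pyGetD targets idx 0 = PySem.List.pyGetD targets (j : Int) 0 := by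
          rw [h2.1]
        rw [if_pos h2, if_pos ⟨List.mem_cons.mpr (Or.inl h2.1),
          by rw [← hteq]; exact h2.2⟩, hteq]
      · rw [if_neg h2, if_neg (by
          rintro ⟨hc, hc2⟩
          rcases List.mem_cons.mp hc with hc | hc
          · refine h2 ⟨hc, ?_⟩
            rw [show PySem.List.pyGetD targets idx 0
                = PySem.List.pyGetD targets (j : Int) 0 from by rw [hc]]
            exact hc2
          · exact h1 ⟨hc, hc2⟩)]

-- B as a join of per-target lines
theorem pv_altB (arr targets : List Int) :
    first_greater_value_alt arr targets =
      PySem.Str.join "\n" (targets.map (fun t => pvLineA (PySem.List.sorted arr (fun x => x)) t)) := by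
  have hsp : (PySem.List.sorted arr (fun x => x)).Pairwise (· ≤ ·) := by
    simpa using PySem.List.sorted_pairwise (xs := arr) (key := fun x => x)
  unfold first_greater_value_alt
  set s := PySem.List.sorted arr (fun x => x) with hsdef
  set order := PySem.List.sorted (PySem.List.pyRange 0 (targets.length : Int))
    (fun k => PySem.List.pyGetD targets k 0) with horder
  have hbd : ∀ idx ∈ order, 0 ≤ idx ∧ idx < (targets.length : Int) := by
    intro idx hidx
    rw [horder, PySem.List.mem_sorted, PySem.List.mem_pyRange_one] at hidx
    exact hidx
  have hpwf : order.Pairwise (fun a b =>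
      PySem.List.pyGetD targets a 0 ≤ PySem.List.pyGetD targets b 0) :=
    PySem.List.sorted_pairwise _ _
  have hmem : ∀ j : Nat, j < targets.length → ((j : Int) ∈ order) := by
    intro j hj
    rw [horder, PySem.List.mem_sorted, PySem.List.mem_pyRange_one]
    omega
  simp only []
  rw [pv_sweep s hsp targets order 0 (List.replicate targets.length (-1)) hpwf (le_refl _)
    (by omega) (by intro idx _ j hj hji; omega)]
  congr 1
  apply List.ext_getElem
  · rw [List.length_map, pv_writefold_len, List.length_replicate, List.length_map]
  · intro j hj hj2
    have hjm : j < targets.length := by rwa [List.length_map] at hj2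
    have hL : (order.foldl (pvWrite s targets) (List.replicate targets.length (-1))).length
        = targets.length := by
      rw [pv_writefold_len, List.length_replicate]
    have hget := pv_writefold_get s targets order (List.replicate targets.length (-1)) j
      (List.length_replicate) hjm hbd
    have hrep : PySem.List.pyGetD (List.replicate targets.length (-1 : Int)) (j : Int) (-1)
        = -1 := by
      rw [PySem.List.pyGetD_natCast, List.getD_eq_getElem _ _ (by simpa using hjm)]
      simp
    have hslot : PySem.List.pyGetD
        (order.foldl (pvWrite s targets) (List.replicate targets.length (-1))) (j : Int) (-1)
        = pvG s (PySem.List.pyGetD targets (j : Int) 0) := by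
      rw [hget]
      by_cases hFl : s.findIdx
          (fun x => decide (PySem.List.pyGetD targets (j : Int) 0 < x)) < s.length
      · rw [if_pos ⟨hmem j hjm, hFl⟩]
      · rw [if_neg (by rintro ⟨_, hc⟩; exact hFl hc), hrep, pvG_of_ge hFl]
    have hgetel : (order.foldl (pvWrite s targets)
        (List.replicate targets.length (-1)))[j]'(by omega)
        = pvG s (PySem.List.pyGetD targets (j : Int) 0) := by
      rw [← hslot, PySem.List.pyGetD_natCast, List.getD_eq_getElem _ _ (by omega)]
    have hT : PySem.List.pyGetD targets (j : Int) 0 = targets[j] := by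
      rw [PySem.List.pyGetD_natCast]
      exact List.getD_eq_getElem targets 0 hjm
    rw [List.getElem_map, List.getElem_map, hgetel, hT]
    rfl

-- ===== VERDICT (by name: the statement is the Claim_ definition above) =====
theorem first_greater_value_spec : Claim_equal_first_greater_value := by
  intro arr targets _hdom
  unfold Spec_first_greater_value
  rw [pv_A_eq, pv_altB]
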